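-- pv_equiv track=rewrite | github.com/cgallic/kai-cmo-harness | scripts/quality/parser.py | _strip_code_blocks
-- ===== SOURCE A (Python) =====
-- from typing import List, Optional
--
-- def _strip_code_blocks(lines: List[str]) -> List[str]:
--     """Replace code block lines with empty strings, preserving line numbers."""
--     result = list(lines)
--     in_code = False
--     for i, line in enumerate(result):
--         if line.strip().startswith('```'):
--             in_code = not in_code
--             result[i] = ''
--         elif in_code:
--             result[i] = ''
--     return result
-- ===== SOURCE B (Python) =====
-- from typing import List, Optional
--
-- def _strip_code_blocks(lines: List[str]) -> List[str]:
--     """Replace code block lines with empty strings, preserving line numbers.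
--
--     Block-skipping scan: on an opening fence, find the closing fence and emit
--     the whole blanked block at once (to EOF if unclosed); no toggle flag.
--     """
--     out: List[str] = []
--     i = 0
--     n = len(lines)
--     while i < n:
--         line = lines[i]
--         if line.strip().startswith('```'):
--             j = i + 1
--             while j < n and not lines[j].strip().startswith('```'):
--                 j += 1
--             if j < n:
--                 out.extend([''] * (j - i + 1))
--                 i = j + 1
--             else:
--                 out.extend([''] * (n - i))
--                 i = n
--         else:
--             out.append(line)
--             i += 1
--     return out
-- ===== Notes on version B (the rewrite author's own statement) =====
-- stated objective: alternative
-- what changed: Replaces the per-line boolean toggle state machine with a block-skipping scan: on an opening fence it searches ahead for the closing fence and emits the whole blanked block at once (to EOF if unclosed), continuing after it; no in_code flag is maintained.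
import Mathlib
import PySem

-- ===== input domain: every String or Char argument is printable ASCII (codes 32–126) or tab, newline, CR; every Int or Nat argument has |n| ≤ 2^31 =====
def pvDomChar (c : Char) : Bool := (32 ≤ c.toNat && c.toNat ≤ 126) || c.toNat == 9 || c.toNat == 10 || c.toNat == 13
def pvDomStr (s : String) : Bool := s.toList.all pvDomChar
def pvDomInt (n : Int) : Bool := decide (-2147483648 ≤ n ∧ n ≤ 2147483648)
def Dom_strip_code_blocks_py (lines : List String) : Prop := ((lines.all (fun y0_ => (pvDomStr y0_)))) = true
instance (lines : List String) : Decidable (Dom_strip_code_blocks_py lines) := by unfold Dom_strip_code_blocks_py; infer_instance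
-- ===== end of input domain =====

-- B blanks fenced blocks by scanning ahead for the closing fence instead of toggling a flag; alternative decomposition, same result.

-- ===== PORT A =====
-- line.strip().startswith('```')
def pvFence (l : String) : Bool := PySem.Str.startswith (PySem.Str.strip l) "```"

-- one iteration of A's for-loop; state = (result, in_code)
def pvStepA (st : List String × Bool) (p : Int × String) : List String × Bool :=
  if pvFence p.2 then (st.1.set p.1.toNat "", !st.2)
  else if st.2 then (st.1.set p.1.toNat "", st.2)
  else st

-- A iterates enumerate(result) but mutates result only at the index already yielded,
-- so folding over enumerate of the initial list is exact; indices are ≥ 0, so .toNat is exact.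
def strip_code_blocks_py (lines : List String) : List String :=
  ((PySem.List.enumerate lines 0).foldl pvStepA (lines, false)).1

-- ===== PORT B =====
-- B's inner while-scan for the next fence: returns its offset, none if absent
def pvFindFence : List String → Option Nat
  | [] => none
  | l :: ls => if pvFence l then some 0 else (pvFindFence ls).map (· + 1)

def strip_code_blocks_py_alt : List String → List String
  | [] => []
  | l :: ls =>
    if pvFence l then
      match pvFindFence ls with
      | none => "" :: List.replicate ls.length ""
      | some j => List.replicate (j + 2) "" ++ strip_code_blocks_py_alt (ls.drop (j + 1))
    else l :: strip_code_blocks_py_alt ls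
termination_by lines => lines.length
decreasing_by all_goals (simp; try omega)

-- ===== PRECONDITION & SPEC =====
def Spec_strip_code_blocks_py (lines : List String) (out : List String) : Prop := out = strip_code_blocks_py_alt lines
instance (lines : List String) (out : List String) : Decidable (Spec_strip_code_blocks_py lines out) := by unfold Spec_strip_code_blocks_py; infer_instance

-- ===== CLAIM (what is proved, stated in full; the proofs are below) =====
def Claim_equal_strip_code_blocks_py : Prop := ∀ (lines : List String), Dom_strip_code_blocks_py lines → Spec_strip_code_blocks_py lines (strip_code_blocks_py lines)

-- ===== LEMMAS AND PROOFS =====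

-- A's toggle loop as a structural recursion over the list with the boolean state
def pvGoA : Bool → List String → List String
  | _, [] => []
  | b, l :: ls =>
    if pvFence l then "" :: pvGoA (!b) ls
    else if b then "" :: pvGoA b ls
    else l :: pvGoA b ls

lemma pvFoldA (ls : List String) : ∀ (pre : List String) (b : Bool),
    (List.foldl pvStepA (pre ++ ls, b) (PySem.List.enumerate ls (pre.length : Int))).1
      = pre ++ pvGoA b ls := by
  induction ls with
  | nil => intro pre b; simp [PySem.List.enumerate, pvGoA]
  | cons l ls ih =>
    intro pre b
    rw [PySem.List.enumerate_cons]
    have hset : ∀ v : String, (pre ++ l :: ls).set pre.length v = (pre ++ [v]) ++ ls := by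
      intro v
      simp
    simp only [List.foldl_cons, pvStepA]
    by_cases hf : pvFence l
    · have h1 : ((pre.length : Int) + 1) = (((pre ++ [""]).length : Nat) : Int) := by
        simp
      simp only [hf, if_pos, Int.toNat_natCast, hset]
      rw [h1, ih]
      simp [pvGoA, hf]
    · by_cases hb : b
      · simp only [hf, if_neg, Bool.false_eq_true, not_false_iff, hb, if_pos,
          Int.toNat_natCast, hset]
        have h1 : ((pre.length : Int) + 1) = (((pre ++ [""]).length : Nat) : Int) := by simp
        rw [h1, ih]
        simp [pvGoA, hf]
      · have h1 : ((pre.length : Int) + 1) = (((pre ++ [l]).length : Nat) : Int) := by simp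
        have hpl : pre ++ l :: ls = (pre ++ [l]) ++ ls := by simp
        simp only [hf, hb, if_neg, Bool.false_eq_true, not_false_iff]
        rw [hpl, h1, ih]
        simp [pvGoA, hf]

lemma pvA_eq_goA (lines : List String) : strip_code_blocks_py lines = pvGoA false lines := by
  have := pvFoldA lines [] false
  simpa [strip_code_blocks_py] using this

lemma pvGoA_true (ls : List String) :
    pvGoA true ls = match pvFindFence ls with
      | none => List.replicate ls.length ""
      | some j => List.replicate (j + 1) "" ++ pvGoA false (ls.drop (j + 1)) := by
  induction ls with
  | nil => simp [pvGoA, pvFindFence]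
  | cons l ls ih =>
    by_cases hf : pvFence l
    · simp [pvGoA, pvFindFence, hf]
    · simp only [pvGoA, pvFindFence, hf, if_neg, Bool.false_eq_true, not_false_iff, ih]
      cases h : pvFindFence ls with
      | none => simp [List.replicate_succ]
      | some j => simp [List.replicate_succ]

lemma pvGoA_eq_alt (lines : List String) : pvGoA false lines = strip_code_blocks_py_alt lines := by
  induction lines using strip_code_blocks_py_alt.induct with
  | case1 => simp [pvGoA, strip_code_blocks_py_alt]
  | case2 l ls hf hnone =>
    rw [strip_code_blocks_py_alt]
    simp only [pvGoA, hf, if_pos, pvGoA_true, hnone, Bool.not_false]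
  | case3 l ls hf j hsome ih =>
    rw [strip_code_blocks_py_alt]
    simp only [pvGoA, hf, if_pos, pvGoA_true, hsome, Bool.not_false, ih]
    simp [List.replicate_succ]
  | case4 l ls hf ih =>
    rw [strip_code_blocks_py_alt]
    simp [pvGoA, hf, ih]

-- ===== VERDICT (by name: the statement is the Claim_ definition above) =====
theorem strip_code_blocks_py_spec : Claim_equal_strip_code_blocks_py := by
  intro lines _
  unfold Spec_strip_code_blocks_py
  rw [pvA_eq_goA, pvGoA_eq_alt]
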